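-- pv_equiv track=rewrite | github.com/woo00oo/codingtest_study | 백준/탐색알고리즘/브루트포스알고리즘/행운의 티켓.py | solution
-- ===== SOURCE A (Python) =====
-- def isLucky(x):
--     mid = len(x) // 2
--     sum1 = sum(x[:mid])
--     sum2 = sum(x[mid:])
--     if sum1 == sum2:
--         return True
--     else:
--         return False
--
-- def solution(arr):
--     # 문자열이 짝수인경우
--     if len(arr) % 2 == 0:
--         chk = len(arr)
--     # 문자열이 홀수인경우
--     else:
--         chk = len(arr) - 1
--     while chk > 0:
--         i = 0
--         ans = 0
--         while i + chk <= len(arr):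
--             # 행운의 티켓이면 반복문 종료
--             if isLucky(arr[i:i + chk]):
--                 ans = chk
--                 return ans
--             i += 1
--         chk -= 2
--     return 0
-- ===== SOURCE B (Python) =====
-- def solution(arr):
--     n = len(arr)
--     # prefix sums: pre[k] = sum of arr[:k]
--     pre = [0]
--     s = 0
--     for v in arr:
--         s += v
--         pre.append(s)
--     best = 0
--     for m in range(1, n // 2 + 1):
--         # window of length 2*m starting at i has equal halves iff
--         # pre[i] + pre[i + 2*m] == 2 * pre[i + m]
--         if any(pre[i] + pre[i + 2 * m] == 2 * pre[i + m] for i in range(n - 2 * m + 1)):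
--             best = 2 * m
--     return best
-- ===== Notes on version B (the rewrite author's own statement) =====
-- stated objective: faster
-- what changed: Replaced the slice-and-resum triple loop with one prefix-sum pass plus an O(1) equal-halves test per window, scanning half-lengths upward and keeping the last (largest) hit instead of returning from the longest length downward.
import Mathlib
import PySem

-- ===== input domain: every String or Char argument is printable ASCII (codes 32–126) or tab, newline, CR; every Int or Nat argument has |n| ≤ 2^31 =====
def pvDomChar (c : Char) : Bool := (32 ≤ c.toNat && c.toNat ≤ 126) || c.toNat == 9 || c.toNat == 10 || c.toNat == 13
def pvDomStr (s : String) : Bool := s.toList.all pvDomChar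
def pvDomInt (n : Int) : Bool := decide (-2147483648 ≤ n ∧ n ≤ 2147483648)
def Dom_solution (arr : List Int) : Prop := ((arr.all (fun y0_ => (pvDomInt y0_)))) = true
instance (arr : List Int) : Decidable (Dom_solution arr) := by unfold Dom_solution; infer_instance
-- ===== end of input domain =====

-- B replaces A's O(n^3) slice-and-resum search with a prefix-sum table and an O(1)
-- equal-halves test per window (O(n^2)); equivalence of the return value is proved below.

-- ===== PORT A =====
def isLucky (x : List Int) : Bool :=
  let mid := x.length / 2
  let sum1 := (PySem.List.slice x none (some (mid : Int))).sum
  let sum2 := (PySem.List.slice x (some (mid : Int)) none).sum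
  if sum1 == sum2 then true else false

-- inner while loop of A: i counts up while i + chk <= len(arr)
def innerA (arr : List Int) (chk : Nat) (i : Nat) : Bool :=
  if i + chk ≤ arr.length then
    if isLucky (PySem.List.slice arr (some (i : Int)) (some ((i : Int) + (chk : Int)))) then true
    else innerA arr chk (i + 1)
  else false
termination_by arr.length + 1 - i
decreasing_by omega

-- outer while loop of A: chk counts down by 2
def outerA (arr : List Int) (chk : Nat) : Int :=
  if chk > 0 then
    if innerA arr chk 0 then (chk : Int) else outerA arr (chk - 2)
  else 0
termination_by chk
decreasing_by omega

def solution (arr : List Int) : Int :=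
  let chk := if arr.length % 2 == 0 then arr.length else arr.length - 1
  outerA arr chk

-- ===== PORT B =====
-- prefix-sum list: preB arr s = [s, s+arr[0], s+arr[0]+arr[1], ...]  (Source B's running-sum append loop)
def preB : List Int → Int → List Int
  | [], s => [s]
  | v :: t, s => s :: preB t (s + v)

def solution_alt (arr : List Int) : Int :=
  let n := arr.length
  let pre := preB arr 0
  (List.range' 1 (n / 2)).foldl
    (fun best m =>
      if (List.range (n - 2 * m + 1)).any
          (fun i => pre.getD i 0 + pre.getD (i + 2 * m) 0 == 2 * pre.getD (i + m) 0)
      then 2 * (m : Int) else best) 0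

-- ===== PRECONDITION & SPEC =====
def Spec_solution (arr : List Int) (out : Int) : Prop := out = solution_alt arr
instance (arr : List Int) (out : Int) : Decidable (Spec_solution arr out) := by unfold Spec_solution; infer_instance

-- ===== CLAIM (what is proved, stated in full; the proofs are below) =====
def Claim_equal_solution : Prop := ∀ (arr : List Int), Dom_solution arr → Spec_solution arr (solution arr)

-- ===== LEMMAS AND PROOFS =====

theorem preB_getD (arr : List Int) (s : Int) (k : Nat) :
    (preB arr s).getD k 0 = s + (arr.take k).sum ∨ arr.length < k := by
  induction arr generalizing s k with
  | nil =>
    cases k with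
    | zero => left; simp [preB]
    | succ k => right; simp
  | cons v t ih =>
    cases k with
    | zero => left; simp [preB]
    | succ k =>
      rcases ih (s + v) k with h | h
      · left
        simp only [preB, List.getD_cons_succ]
        rw [h, List.take_succ_cons, List.sum_cons]
        ring
      · right; simp; omega

theorem preB_getD_of_le (arr : List Int) (k : Nat) (hk : k ≤ arr.length) :
    (preB arr 0).getD k 0 = (arr.take k).sum := by
  rcases preB_getD arr 0 k with h | h
  · simpa using h
  · omega

theorem sum_take_add (arr : List Int) (i k : Nat) :
    (arr.take (i + k)).sum = (arr.take i).sum + ((arr.drop i).take k).sum := by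
  rw [List.take_add, List.sum_append]

-- the core bridge: A's isLucky on a window equals B's prefix-sum equation
theorem lucky_iff (arr : List Int) (i m : Nat) (h : i + 2 * m ≤ arr.length) :
    isLucky ((arr.drop i).take (2 * m)) = true ↔
      (arr.take i).sum + (arr.take (i + 2 * m)).sum = 2 * (arr.take (i + m)).sum := by
  have hlen : ((arr.drop i).take (2 * m)).length = 2 * m := by
    simp; omega
  have hmid : ((arr.drop i).take (2 * m)).length / 2 = m := by omega
  have htake : ((arr.drop i).take (2 * m)).take m = (arr.drop i).take m := by
    rw [List.take_take]; congr 1; omega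
  have hdrop : ((arr.drop i).take (2 * m)).drop m = (arr.drop (i + m)).take m := by
    rw [List.drop_take, List.drop_drop]
    congr 1
    omega
  have h1 := sum_take_add arr i (2 * m)
  have h2 := sum_take_add arr i m
  have h3 := sum_take_add arr (i + m) m
  simp only [isLucky, hmid, PySem.List.slice_to_natCast, PySem.List.slice_from_natCast,
    htake, hdrop]
  constructor
  · intro hb
    have : ((arr.drop i).take m).sum = ((arr.drop (i + m)).take m).sum := by
      by_contra hne
      simp [hne] at hb
    have h4 : i + 2 * m = (i + m) + m := by omega
    rw [h4] at h1 ⊢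
    omega
  · intro he
    have h4 : i + 2 * m = (i + m) + m := by omega
    rw [h4] at h1 he
    have : ((arr.drop i).take m).sum = ((arr.drop (i + m)).take m).sum := by omega
    simp [this]

-- A's inner loop finds a lucky window at or after position i
theorem innerA_iff (arr : List Int) (chk : Nat) (i : Nat) :
    innerA arr chk i = true ↔
      ∃ j, i ≤ j ∧ j + chk ≤ arr.length ∧
        isLucky ((arr.drop j).take chk) = true := by
  induction i using innerA.induct arr chk with
  | case1 i hle hluck =>
    have hs : PySem.List.slice arr (some (i : Int)) (some ((i : Int) + (chk : Int))) =
        (arr.drop i).take chk := PySem.List.slice_natCast_add arr i chk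
    have hval : innerA arr chk i = true := by rw [innerA]; simp [hle, hluck]
    rw [hval]
    constructor
    · intro _
      exact ⟨i, le_refl i, hle, by rw [hs] at hluck; exact hluck⟩
    · intro _; rfl
  | case2 i hle hluck ih =>
    have hs : PySem.List.slice arr (some (i : Int)) (some ((i : Int) + (chk : Int))) =
        (arr.drop i).take chk := PySem.List.slice_natCast_add arr i chk
    rw [hs] at hluck
    have hval : innerA arr chk i = innerA arr chk (i + 1) := by
      rw [innerA]; simp [hle, hs, hluck]
    rw [hval, ih]
    constructor
    · rintro ⟨j, hj1, hj2, hj3⟩; exact ⟨j, by omega, hj2, hj3⟩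
    · rintro ⟨j, hj1, hj2, hj3⟩
      refine ⟨j, ?_, hj2, hj3⟩
      rcases Nat.eq_or_lt_of_le hj1 with h | h
      · exact absurd (h ▸ hj3) hluck
      · omega
  | case3 i hle =>
    have hval : innerA arr chk i = false := by rw [innerA]; simp [hle]
    rw [hval]
    simp only [Bool.false_eq_true, false_iff]
    rintro ⟨j, hj1, hj2, _⟩; omega

-- B's any-test over starting positions equals the same existential, via the prefix-sum bridge
theorem anyB_iff (arr : List Int) (m : Nat) (hm1 : 1 ≤ m) (hm2 : 2 * m ≤ arr.length) :
    ((List.range (arr.length - 2 * m + 1)).any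
        (fun i => (preB arr 0).getD i 0 + (preB arr 0).getD (i + 2 * m) 0 ==
                   2 * (preB arr 0).getD (i + m) 0)) = true ↔
      ∃ j, 0 ≤ j ∧ j + 2 * m ≤ arr.length ∧
        isLucky ((arr.drop j).take (2 * m)) = true := by
  rw [List.any_eq_true]
  constructor
  · rintro ⟨i, hmem, hcond⟩
    rw [List.mem_range] at hmem
    have hi : i + 2 * m ≤ arr.length := by omega
    refine ⟨i, Nat.zero_le i, hi, ?_⟩
    rw [lucky_iff arr i m hi]
    rw [preB_getD_of_le arr i (by omega), preB_getD_of_le arr (i + 2 * m) hi,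
      preB_getD_of_le arr (i + m) (by omega)] at hcond
    simpa using hcond
  · rintro ⟨j, _, hj, hluck⟩
    refine ⟨j, by rw [List.mem_range]; omega, ?_⟩
    rw [lucky_iff arr j m hj] at hluck
    rw [preB_getD_of_le arr j (by omega), preB_getD_of_le arr (j + 2 * m) hj,
      preB_getD_of_le arr (j + m) (by omega)]
    simpa using hluck

-- the two loop shapes agree: A's downward scan from 2*k equals B's upward fold over [1..k]
theorem outer_eq_fold (arr : List Int) (k : Nat) (hk : 2 * k ≤ arr.length) :
    outerA arr (2 * k) =
      (List.range' 1 k).foldl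
        (fun best m =>
          if (List.range (arr.length - 2 * m + 1)).any
              (fun i => (preB arr 0).getD i 0 + (preB arr 0).getD (i + 2 * m) 0 ==
                         2 * (preB arr 0).getD (i + m) 0)
          then 2 * (m : Int) else best) 0 := by
  induction k with
  | zero => rw [outerA]; simp
  | succ k ih =>
    have hk' : 2 * k ≤ arr.length := by omega
    rw [List.range'_1_concat, List.foldl_append, Nat.add_comm 1 k]
    rw [outerA, if_pos (by omega)]
    have heq : innerA arr (2 * (k + 1)) 0 = true ↔
        ((List.range (arr.length - 2 * (k + 1) + 1)).any
          (fun i => (preB arr 0).getD i 0 + (preB arr 0).getD (i + 2 * (k + 1)) 0 ==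
                     2 * (preB arr 0).getD (i + (k + 1)) 0)) = true := by
      rw [innerA_iff, anyB_iff arr (k + 1) (by omega) hk]
    by_cases hin : innerA arr (2 * (k + 1)) 0 = true
    · simp only [List.foldl_cons, List.foldl_nil, hin, heq.mp hin, if_true]
      push_cast; ring
    · have hany := heq.not.mp hin
      simp only [List.foldl_cons, List.foldl_nil]
      rw [if_neg (by simpa using hin), if_neg (by simpa using hany)]
      have : 2 * (k + 1) - 2 = 2 * k := by omega
      rw [this, ih hk']

-- ===== VERDICT (by name: the statement is the Claim_ definition above) =====
theorem solution_spec : Claim_equal_solution := by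
  intro arr _
  unfold Spec_solution solution solution_alt
  have hchk : (if arr.length % 2 == 0 then arr.length else arr.length - 1) =
      2 * (arr.length / 2) := by
    by_cases h : arr.length % 2 = 0 <;> simp [h] <;> omega
  rw [hchk]
  exact outer_eq_fold arr (arr.length / 2) (by omega)
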